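-- pv_equiv track=rewrite | github.com/SamenB/ArtShop | backend/src/services/artwork_print_workflow.py | _compute_overall_status
-- ===== SOURCE A (Python) =====
-- from typing import Any
--
-- def _compute_overall_status(slots: list[dict[str, Any]], print_enabled: bool) -> str:
--     if not print_enabled:
--         return "not_required"
--     relevant = [slot for slot in slots if slot["relevant"]]
--     if not relevant:
--         return "not_required"
--     if any(slot["status"] == "blocked" for slot in relevant):
--         return "blocked"
--     if any(slot["status"] == "attention" for slot in relevant):
--         return "attention"
--     return "ready"
-- ===== SOURCE B (Python) =====
-- def _compute_overall_status(slots, print_enabled):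
--     if not print_enabled:
--         return "not_required"
--     saw_relevant = False
--     has_blocked = False
--     has_attention = False
--     for slot in slots:
--         if not slot["relevant"]:
--             continue
--         saw_relevant = True
--         status = slot["status"]
--         if status == "blocked":
--             has_blocked = True
--         elif status == "attention":
--             has_attention = True
--     if not saw_relevant:
--         return "not_required"
--     if has_blocked:
--         return "blocked"
--     if has_attention:
--         return "attention"
--     return "ready"
-- ===== Notes on version B (the rewrite author's own statement) =====
-- stated objective: simpler
-- what changed: Replaces the filter-plus-two-any scans with a single pass over slots that maintains saw_relevant/has_blocked/has_attention flags and decides the status after the loop.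
import Mathlib
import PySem

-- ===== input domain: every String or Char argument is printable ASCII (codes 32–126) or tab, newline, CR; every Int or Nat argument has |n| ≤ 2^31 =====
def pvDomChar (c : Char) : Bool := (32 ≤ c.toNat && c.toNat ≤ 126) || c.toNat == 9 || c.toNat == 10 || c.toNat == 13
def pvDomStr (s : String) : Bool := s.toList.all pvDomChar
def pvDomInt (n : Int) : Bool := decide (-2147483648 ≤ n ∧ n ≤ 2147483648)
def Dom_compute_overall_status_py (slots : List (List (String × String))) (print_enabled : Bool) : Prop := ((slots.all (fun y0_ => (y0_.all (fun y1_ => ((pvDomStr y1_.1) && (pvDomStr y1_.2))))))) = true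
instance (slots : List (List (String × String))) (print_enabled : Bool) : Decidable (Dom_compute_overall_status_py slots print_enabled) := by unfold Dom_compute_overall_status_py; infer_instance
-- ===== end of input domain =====

-- B replaces A's filter-plus-two-any scans with a single pass maintaining three boolean flags (simpler decomposition, same cost).

-- first-match lookup in an association list (Python dict access, totalized with a default;
-- Pre_ guarantees the key is present wherever the Python actually reads it)
def pvGetD (d : List (String × String)) (k dflt : String) : String :=
  ((d.find? (fun p => p.1 == k)).map Prod.snd).getD dflt

-- Python truthiness of slot["relevant"] (a string): nonempty
def pvRel (t : List (String × String)) : Bool := pvGetD t "relevant" "" != ""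

-- ===== PORT A =====
def compute_overall_status_py (slots : List (List (String × String))) (print_enabled : Bool) : String :=
  if !print_enabled then "not_required"
  else
    let relevant := slots.filter pvRel
    if relevant.isEmpty then "not_required"
    else if relevant.any (fun t => pvGetD t "status" "" == "blocked") then "blocked"
    else if relevant.any (fun t => pvGetD t "status" "" == "attention") then "attention"
    else "ready"

-- ===== PORT B =====
-- the for-loop of Source B: one pass carrying (saw_relevant, has_blocked, has_attention)
def pvAltLoop : List (List (String × String)) → Bool → Bool → Bool → Bool × Bool × Bool
  | [], saw, blk, att => (saw, blk, att)
  | t :: rest, saw, blk, att =>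
    if !pvRel t then pvAltLoop rest saw blk att
    else
      let status := pvGetD t "status" ""
      if status == "blocked" then pvAltLoop rest true true att
      else if status == "attention" then pvAltLoop rest true blk true
      else pvAltLoop rest true blk att

def compute_overall_status_py_alt (slots : List (List (String × String))) (print_enabled : Bool) : String :=
  if !print_enabled then "not_required"
  else
    let r := pvAltLoop slots false false false
    if !r.1 then "not_required"
    else if r.2.1 then "blocked"
    else if r.2.2 then "attention"
    else "ready"

-- ===== PRECONDITION & SPEC =====
-- Pre_ excludes the inputs where the Python raises KeyError: when printing is enabled, every slot
-- must carry the "relevant" key and every relevant slot the "status" key.  This also excludes the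
-- corner where A returns "blocked" before reaching a relevant slot that lacks "status" (which of
-- the two outcomes occurs depends on any()'s short-circuit evaluation order); B raises KeyError there.
def Pre_compute_overall_status_py (slots : List (List (String × String))) (print_enabled : Bool) : Prop :=
  print_enabled = true →
    ∀ t ∈ slots, (t.any (fun p => p.1 == "relevant")) = true ∧
      (pvRel t = true → (t.any (fun p => p.1 == "status")) = true)
instance (slots : List (List (String × String))) (print_enabled : Bool) : Decidable (Pre_compute_overall_status_py slots print_enabled) := by unfold Pre_compute_overall_status_py; infer_instance

def pvWitness_compute_overall_status_py : (List (List (String × String))) × Bool :=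
  ([[("relevant", "1"), ("status", "ready")], [("relevant", "")]], true)

def Spec_compute_overall_status_py (slots : List (List (String × String))) (print_enabled : Bool) (out : String) : Prop := out = compute_overall_status_py_alt slots print_enabled
instance (slots : List (List (String × String))) (print_enabled : Bool) (out : String) : Decidable (Spec_compute_overall_status_py slots print_enabled out) := by unfold Spec_compute_overall_status_py; infer_instance

-- ===== CLAIM (what is proved, stated in full; the proofs are below) =====
def Claim_equal_compute_overall_status_py : Prop := ∀ (slots : List (List (String × String))) (print_enabled : Bool), Dom_compute_overall_status_py slots print_enabled → Pre_compute_overall_status_py slots print_enabled → Spec_compute_overall_status_py slots print_enabled (compute_overall_status_py slots print_enabled)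

-- ===== LEMMAS AND PROOFS =====

-- the loop computes: saw = saw ∨ some relevant slot; blk/att = flag ∨ some relevant slot with that status
theorem pvAltLoop_eq (slots : List (List (String × String))) (saw blk att : Bool) :
    pvAltLoop slots saw blk att =
      (saw || slots.any pvRel,
       blk || (slots.filter pvRel).any (fun t => pvGetD t "status" "" == "blocked"),
       att || (slots.filter pvRel).any (fun t => pvGetD t "status" "" == "attention")) := by
  induction slots generalizing saw blk att with
  | nil => simp [pvAltLoop]
  | cons t rest ih =>
    by_cases hr : pvRel t
    · by_cases hb : pvGetD t "status" "" == "blocked"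
      · simp [pvAltLoop, hr, ih, eq_of_beq hb]
      · by_cases ha : pvGetD t "status" "" == "attention"
        · simp [pvAltLoop, hr, hb, ha, ih]
        · simp [pvAltLoop, hr, hb, ha, ih]
    · simp [pvAltLoop, hr, ih]

theorem any_rel_eq_not_isEmpty_filter (slots : List (List (String × String))) :
    slots.any pvRel = !(slots.filter pvRel).isEmpty := by
  induction slots with
  | nil => simp
  | cons t rest ih =>
    by_cases hr : pvRel t
    · simp [hr]
    · simp [hr, ih]

-- ===== VERDICT (by name: the statement is the Claim_ definition above) =====
theorem compute_overall_status_py_spec : Claim_equal_compute_overall_status_py := by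
  intro slots print_enabled _ _
  unfold Spec_compute_overall_status_py
  cases print_enabled with
  | false => rfl
  | true =>
    simp only [compute_overall_status_py, compute_overall_status_py_alt,
      pvAltLoop_eq, Bool.false_or]
    rw [any_rel_eq_not_isEmpty_filter]
    cases h : (slots.filter pvRel).isEmpty <;> simp
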